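-- pv_equiv track=rewrite | github.com/MunskyGroup/rSNAPsim | rsnapsim/rsnapsim_model_maker.py | invert_pair_locations
-- ===== SOURCE A (Python) =====
-- def invert_pair_locations(pair_locations, length):
--     '''
--     invert a set of pair locations of a string so we have all indexes of all substrings
--
--     example:
--
--         s = 'abc[defg]hijk'
--         pair_locations = [(3,8), ] #pair strings of [*]
--         length = 12
--
--         result: [(0,3),(8,11) ] #inverted pair strings!
--
--     Parameters
--     ----------
--     pair_locations : list of tuples of ints
--         substring pair locations of brackets in a string in a format [(x,y), (z,w)...] .
--     length : int
--         total length of the string the pair locations come from.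
--
--     Returns
--     -------
--     inverse_pair_locations : list of tuples of ints
--         inverted substring pair locations of brackets (indexes of substrings outside brackets).
--
--     '''
--     order = ''
--     inverse_pair_locations = []
--
--     if pair_locations[0][0] == 0:
--         order += 'm'
--     else:
--         order += 'i'
--         inverse_pair_locations = inverse_pair_locations + [(0, pair_locations[0][0]),]
--     for i in range(len(pair_locations)-1):
--         inverse_pair_locations = inverse_pair_locations + [(pair_locations[i][1], pair_locations[i+1][0]),]
--
--     if pair_locations[-1][1] != length:
--         inverse_pair_locations = inverse_pair_locations + [(pair_locations[-1][1], length),]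
--         order += 'i'
--     else:
--         order += 'm'
--     return inverse_pair_locations
-- ===== SOURCE B (Python) =====
-- def invert_pair_locations(pair_locations, length):
--     points = [0] + [c for p in pair_locations for c in p] + [length]
--     candidates = [(points[2 * i], points[2 * i + 1])
--                   for i in range(len(pair_locations) + 1)]
--     lo = 1 if pair_locations[0][0] == 0 else 0
--     hi = len(candidates) - (1 if pair_locations[-1][1] == length else 0)
--     return candidates[lo:hi]
-- ===== Notes on version B (the rewrite author's own statement) =====
-- stated objective: simpler
-- what changed: B replaces A's three-phase branch-and-append construction (head branch, pairwise loop with repeated list concatenation, tail branch) by building one flattened boundary list [0]+coords+[length], pairing consecutive boundary points into candidate gaps, and slicing off the first/last candidate when the brackets touch the string ends.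
import Mathlib
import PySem

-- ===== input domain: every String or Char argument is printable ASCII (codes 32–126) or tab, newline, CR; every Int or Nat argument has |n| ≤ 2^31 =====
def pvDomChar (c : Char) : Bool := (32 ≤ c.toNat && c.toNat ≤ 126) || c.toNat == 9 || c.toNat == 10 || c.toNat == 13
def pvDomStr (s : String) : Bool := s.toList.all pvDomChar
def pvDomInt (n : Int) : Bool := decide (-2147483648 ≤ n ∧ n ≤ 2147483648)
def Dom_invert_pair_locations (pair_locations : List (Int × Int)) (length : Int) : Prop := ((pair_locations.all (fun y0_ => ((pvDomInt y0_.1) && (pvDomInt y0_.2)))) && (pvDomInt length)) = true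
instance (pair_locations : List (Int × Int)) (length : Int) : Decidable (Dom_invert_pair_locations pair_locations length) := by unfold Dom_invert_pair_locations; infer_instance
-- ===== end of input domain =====

-- B replaces A's branch-and-append construction by pairing consecutive points of one
-- flattened boundary list and slicing off end candidates (objective: simpler).

-- ===== PORT A =====
def invert_pair_locations (pair_locations : List (Int × Int)) (length : Int) : List (Int × Int) :=
  match pair_locations with
  | [] => []  -- pair_locations[0] raises IndexError in Python; excluded by Pre_
  | h :: _ =>
    -- if pair_locations[0][0] == 0: (order bookkeeping has no effect on the result)
    let ipl0 : List (Int × Int) := if h.1 = 0 then [] else [(0, h.1)]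
    -- for i in range(len(pair_locations)-1): ipl = ipl + [(pl[i][1], pl[i+1][0])]
    let ipl := (List.range (pair_locations.length - 1)).foldl
      (fun acc i => acc ++ [((pair_locations.getD i (0, 0)).2, (pair_locations.getD (i + 1) (0, 0)).1)]) ipl0
    let last := pair_locations.getLastD (0, 0)  -- pair_locations[-1]
    if last.2 ≠ length then ipl ++ [(last.2, length)] else ipl

-- ===== PORT B =====
def invert_pair_locations_alt (pair_locations : List (Int × Int)) (length : Int) : List (Int × Int) :=
  match pair_locations with
  | [] => []  -- pair_locations[0] raises IndexError in Python; excluded by Pre_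
  | h :: _ =>
    let points : List Int := [0] ++ pair_locations.flatMap (fun p => [p.1, p.2]) ++ [length]
    let candidates := (List.range (pair_locations.length + 1)).map
      (fun i => (points.getD (2 * i) 0, points.getD (2 * i + 1) 0))
    let lo : Int := if h.1 = 0 then 1 else 0
    let hi : Int := (candidates.length : Int) - (if (pair_locations.getLastD (0, 0)).2 = length then 1 else 0)
    PySem.List.slice candidates (some lo) (some hi)

-- ===== PRECONDITION & SPEC =====
-- A (and B) index pair_locations[0], which raises IndexError on the empty list.
def Pre_invert_pair_locations (pair_locations : List (Int × Int)) (length : Int) : Prop :=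
  pair_locations ≠ []
instance (pair_locations : List (Int × Int)) (length : Int) : Decidable (Pre_invert_pair_locations pair_locations length) := by unfold Pre_invert_pair_locations; infer_instance
def pvWitness_invert_pair_locations : (List (Int × Int)) × Int := ([(3, 8)], 12)

def Spec_invert_pair_locations (pair_locations : List (Int × Int)) (length : Int) (out : List (Int × Int)) : Prop := out = invert_pair_locations_alt pair_locations length
instance (pair_locations : List (Int × Int)) (length : Int) (out : List (Int × Int)) : Decidable (Spec_invert_pair_locations pair_locations length out) := by unfold Spec_invert_pair_locations; infer_instance

-- ===== CLAIM (what is proved, stated in full; the proofs are below) =====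
def Claim_equal_invert_pair_locations : Prop := ∀ (pair_locations : List (Int × Int)) (length : Int), Dom_invert_pair_locations pair_locations length → Pre_invert_pair_locations pair_locations length → Spec_invert_pair_locations pair_locations length (invert_pair_locations pair_locations length)

-- ===== LEMMAS AND PROOFS =====

-- interior gaps between consecutive pairs
def pvGaps : List (Int × Int) → List (Int × Int)
  | [] => []
  | [_] => []
  | p :: q :: r => (p.2, q.1) :: pvGaps (q :: r)

-- chained candidates, starting from left boundary x, ending at L
def pvCand (x : Int) : List (Int × Int) → Int → List (Int × Int)
  | [], L => [(x, L)]
  | p :: r, L => (x, p.1) :: pvCand p.2 r L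

theorem pvRange_succ_map {a : Type} (n : Nat) (f : Nat → a) :
    (List.range (n + 1)).map f = f 0 :: (List.range n).map (fun i => f (i + 1)) := by
  rw [List.range_succ_eq_map, List.map_cons, List.map_map]; rfl

theorem pvGaps_length (h : Int × Int) (t : List (Int × Int)) :
    (pvGaps (h :: t)).length = t.length := by
  induction t generalizing h with
  | nil => simp [pvGaps]
  | cons q r ih => simp [pvGaps, ih q]

theorem pvCand_eq (t : List (Int × Int)) (h : Int × Int) (L : Int) :
    pvCand h.2 t L = pvGaps (h :: t) ++ [(((h :: t).getLastD (0, 0)).2, L)] := by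
  induction t generalizing h with
  | nil => simp [pvCand, pvGaps]
  | cons q r ih => simp [pvCand, pvGaps, ih q]

theorem pvMid_eq (pl : List (Int × Int)) :
    (List.range (pl.length - 1)).map
      (fun i => ((pl.getD i (0, 0)).2, (pl.getD (i + 1) (0, 0)).1)) = pvGaps pl := by
  induction pl with
  | nil => simp [pvGaps]
  | cons p t ih =>
    cases t with
    | nil => simp [pvGaps]
    | cons q r =>
      rw [show (p :: q :: r).length - 1 = r.length + 1 from by simp, pvRange_succ_map]
      simp only [List.getD_cons_succ, List.getD_cons_zero]
      have ih' := ih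
      simp only [List.getD_cons_succ, List.length_cons, Nat.add_sub_cancel] at ih'
      rw [show pvGaps (p :: q :: r) = (p.2, q.1) :: pvGaps (q :: r) from rfl, ← ih']

theorem pvCandidates_eq (q : List (Int × Int)) (x L : Int) :
    (List.range (q.length + 1)).map
      (fun i => ((x :: (q.flatMap (fun p => [p.1, p.2]) ++ [L])).getD (2 * i) 0,
                 (x :: (q.flatMap (fun p => [p.1, p.2]) ++ [L])).getD (2 * i + 1) 0))
      = pvCand x q L := by
  induction q generalizing x with
  | nil => simp [pvCand]
  | cons p r ih =>
    rw [List.length_cons, pvRange_succ_map]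
    rw [show pvCand x (p :: r) L = (x, p.1) :: pvCand p.2 r L from rfl, ← ih p.2]
    refine congrArg₂ List.cons ?_ (List.map_congr_left ?_)
    · simp [List.flatMap_cons]
    · intro i _
      rw [show 2 * (i + 1) = (2 * i + 1) + 1 from by omega]
      simp [List.flatMap_cons]

theorem pvFoldl_append (l : List Nat) (f : Nat → Int × Int) (init : List (Int × Int)) :
    l.foldl (fun acc i => acc ++ [f i]) init = init ++ l.map f := by
  induction l generalizing init with
  | nil => simp
  | cons a t ih => simp [List.foldl_cons, ih]

theorem invert_pair_locations_spec : Claim_equal_invert_pair_locations := by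
  intro pl L _ hpre
  unfold Spec_invert_pair_locations
  match pl, hpre with
  | h :: t, _ =>
    show invert_pair_locations (h :: t) L = invert_pair_locations_alt (h :: t) L
    simp only [invert_pair_locations, invert_pair_locations_alt]
    rw [pvFoldl_append, pvMid_eq]
    rw [show ([0] ++ (h :: t).flatMap (fun p => [p.1, p.2]) ++ [L])
        = 0 :: ((h :: t).flatMap (fun p => [p.1, p.2]) ++ [L]) from by simp]
    rw [pvCandidates_eq (h :: t) 0 L,
        show pvCand 0 (h :: t) L = (0, h.1) :: pvCand h.2 t L from rfl,
        pvCand_eq t h L]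
    set g := pvGaps (h :: t) with hg
    set lst := ((h :: t).getLastD (0, 0)) with hlst
    have hgl : g.length = t.length := by rw [hg]; exact pvGaps_length h t
    have hlen : ((0, h.1) :: (g ++ [(lst.2, L)])).length = t.length + 2 := by simp [hgl]
    by_cases h0 : h.1 = 0 <;> by_cases hL : lst.2 = L
    · rw [if_pos h0, if_pos h0, if_pos hL, if_neg (not_not_intro hL)]
      rw [PySem.List.slice_toNat _ (by omega) (by rw [hlen]; push_cast; omega)]
      rw [show ((((0, h.1) :: (g ++ [(lst.2, L)])).length : Int) - 1).toNat - (1 : Int).toNat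
          = t.length from by rw [hlen]; omega]
      rw [show (1 : Int).toNat = 1 from rfl, List.drop_one, List.tail_cons]
      rw [← hgl, List.take_left]
      simp
    · rw [if_pos h0, if_pos h0, if_neg hL, if_pos hL]
      rw [PySem.List.slice_toNat _ (by omega) (by rw [hlen]; push_cast; omega)]
      rw [show ((((0, h.1) :: (g ++ [(lst.2, L)])).length : Int) - 0).toNat - (1 : Int).toNat
          = t.length + 1 from by rw [hlen]; omega]
      rw [show (1 : Int).toNat = 1 from rfl, List.drop_one, List.tail_cons]
      rw [show t.length + 1 = (g ++ [(lst.2, L)]).length from by simp [hgl], List.take_length]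
      simp
    · rw [if_neg h0, if_neg h0, if_pos hL, if_neg (not_not_intro hL)]
      rw [PySem.List.slice_toNat _ (by omega) (by rw [hlen]; push_cast; omega)]
      rw [show ((((0, h.1) :: (g ++ [(lst.2, L)])).length : Int) - 1).toNat - (0 : Int).toNat
          = t.length + 1 from by rw [hlen]; omega]
      rw [show (0 : Int).toNat = 0 from rfl, List.drop_zero, List.take_succ_cons]
      rw [← hgl, List.take_left]
      simp
    · rw [if_neg h0, if_neg h0, if_neg hL, if_pos hL]
      rw [PySem.List.slice_toNat _ (by omega) (by rw [hlen]; push_cast; omega)]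
      rw [show ((((0, h.1) :: (g ++ [(lst.2, L)])).length : Int) - 0).toNat - (0 : Int).toNat
          = t.length + 2 from by rw [hlen]; omega]
      rw [show (0 : Int).toNat = 0 from rfl, List.drop_zero]
      rw [show t.length + 2 = ((0, h.1) :: (g ++ [(lst.2, L)])).length from hlen.symm,
          List.take_length]
      simp
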